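-- pv_equiv track=rewrite | github.com/SabaKathawala/Assignment3_ML | test/MSCandidate_gen_SPM.py | createSubset
-- ===== SOURCE A (Python) =====
-- import copy
--
-- def createSubset(candidate, length):
--     size = len(candidate)
--     CandidateSubArray = []
--     for index in range(length):
--         flag = False
--         candidate1 = copy.deepcopy(candidate)
--         count = 0
--         if size == 1:
--             for each in candidate1[0]:
--                 count += 1
--                 if count == index + 1:
--                     candidate1[0].remove(each)
--                     CandidateSubArray.append(candidate1)
--                     break
--         else:
--             for j, each in enumerate(candidate1):
--                 if len(each) == 1:
--                     count += 1
--                     if count == index + 1: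
--                         candidate1.remove(each)
--                         CandidateSubArray.append(candidate1)
--                         break
--                 else:
--                     for every in each:
--                         count += 1
--                         if count == index + 1:
--                             candidate1[j].remove(every)
--                             CandidateSubArray.append(candidate1)
--                             flag = True
--                             break
--                     if flag:
--                         break
--     return CandidateSubArray
-- ===== SOURCE B (Python) =====
-- import copy
--
-- def createSubset(candidate, length):
--     # Precompute the ordered removal actions once, then apply one per output copy.
--     actions = []
--     if len(candidate) == 1:
--         for v in candidate[0]:
--             actions.append(('inner', 0, v))
--     else:
--         j = 0
--         for sub in candidate:
--             if len(sub) == 1: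
--                 actions.append(('outer', sub, None))
--             else:
--                 for v in sub:
--                     actions.append(('inner', j, v))
--             j += 1
--     result = []
--     for kind, a, b in actions[:max(length, 0)]:
--         c = copy.deepcopy(candidate)
--         if kind == 'outer':
--             c.remove(a)
--         else:
--             c[a].remove(b)
--         result.append(c)
--     return result
-- ===== Notes on version B (the rewrite author's own statement) =====
-- stated objective: simpler
-- what changed: B precomputes the ordered list of removal actions in one walk over the structure and then maps one deepcopy-plus-remove over the first max(length,0) actions, instead of A's per-output rescan of the whole structure with a counter, flag and break logic.
import Mathlib
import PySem

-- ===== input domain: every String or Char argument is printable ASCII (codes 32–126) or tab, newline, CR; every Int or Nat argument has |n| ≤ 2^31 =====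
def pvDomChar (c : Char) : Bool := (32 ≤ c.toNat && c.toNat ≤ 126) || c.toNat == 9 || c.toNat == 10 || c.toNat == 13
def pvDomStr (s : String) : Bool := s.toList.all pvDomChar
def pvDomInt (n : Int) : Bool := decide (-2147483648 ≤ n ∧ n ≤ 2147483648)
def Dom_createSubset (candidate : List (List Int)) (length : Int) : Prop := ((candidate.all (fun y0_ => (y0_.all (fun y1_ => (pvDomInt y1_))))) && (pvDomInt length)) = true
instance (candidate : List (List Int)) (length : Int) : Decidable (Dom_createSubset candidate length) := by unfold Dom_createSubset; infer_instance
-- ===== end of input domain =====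

-- B precomputes the ordered removal actions once and maps over them (simpler; A rescans the
-- structure from the start for every output copy).  Equivalence is about the return value only.

-- ===== PORT A =====
-- '.remove' never raises here (the removed value always comes from the list), so '.getD' is exact.
def pyRemoveI (xs : List Int) (v : Int) : List Int := (PySem.List.remove? xs v).getD xs
def pyRemoveL (xs : List (List Int)) (v : List Int) : List (List Int) := (PySem.List.remove? xs v).getD xs

-- 'for each in candidate1[0]: count += 1; if count == index+1: candidate1[0].remove(each); break'
def findRemove1 (orig : List Int) (rest : List Int) (count target : Int) : Option (List Int) :=
  match rest with
  | [] => none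
  | x :: xs =>
    if count + 1 = target then some (pyRemoveI orig x)
    else findRemove1 orig xs (count + 1) target

-- inner 'for every in each' loop of the else-branch
def innerLoop (rest : List Int) (count target : Int) : Option Int :=
  match rest with
  | [] => none
  | v :: vs => if count + 1 = target then some v else innerLoop vs (count + 1) target

-- 'for j, each in enumerate(candidate1): …' of the else-branch
def findRemove2 (orig : List (List Int)) (rest : List (List Int)) (j : Nat) (count target : Int) :
    Option (List (List Int)) :=
  match rest with
  | [] => none
  | each :: rs =>
    if each.length = 1 then
      if count + 1 = target then some (pyRemoveL orig each)
      else findRemove2 orig rs (j + 1) (count + 1) target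
    else
      match innerLoop each count target with
      | some v => some (orig.set j (pyRemoveI each v))
      | none => findRemove2 orig rs (j + 1) (count + each.length) target

def createSubset (candidate : List (List Int)) (length : Int) : List (List (List Int)) :=
  (PySem.List.pyRange 0 length 1).foldl (fun acc index =>
    if candidate.length = 1 then
      match findRemove1 (candidate.headD []) (candidate.headD []) 0 (index + 1) with
      | some newlst => acc ++ [[newlst]]
      | none => acc
    else
      match findRemove2 candidate candidate 0 0 (index + 1) with
      | some c => acc ++ [c]
      | none => acc) []

-- ===== PORT B =====
inductive PvAction where
  | outer (sub : List Int)
  | inner (j : Nat) (v : Int)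
deriving DecidableEq, Repr

-- the else-branch action-collection loop of Source B ('j += 1' per sublist)
def actsB (j : Nat) (rest : List (List Int)) : List PvAction :=
  match rest with
  | [] => []
  | sub :: rs =>
    (if sub.length = 1 then [PvAction.outer sub] else sub.map (PvAction.inner j)) ++ actsB (j + 1) rs

def actionsOf (candidate : List (List Int)) : List PvAction :=
  if candidate.length = 1 then (candidate.headD []).map (PvAction.inner 0)
  else actsB 0 candidate

def applyAction (candidate : List (List Int)) : PvAction → List (List Int)
  | .outer sub => (PySem.List.remove? candidate sub).getD candidate
  | .inner j v =>
    candidate.set j ((PySem.List.remove? (candidate.getD j []) v).getD (candidate.getD j []))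

def createSubset_alt (candidate : List (List Int)) (length : Int) : List (List (List Int)) :=
  ((actionsOf candidate).take (max length 0).toNat).map (applyAction candidate)

-- ===== PRECONDITION & SPEC =====
def Spec_createSubset (candidate : List (List Int)) (length : Int) (out : List (List (List Int))) : Prop := out = createSubset_alt candidate length
instance (candidate : List (List Int)) (length : Int) (out : List (List (List Int))) : Decidable (Spec_createSubset candidate length out) := by unfold Spec_createSubset; infer_instance

-- ===== CLAIM (what is proved, stated in full; the proofs are below) =====
def Claim_equal_createSubset : Prop := ∀ (candidate : List (List Int)) (length : Int), Dom_createSubset candidate length → Spec_createSubset candidate length (createSubset candidate length)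

-- ===== LEMMAS AND PROOFS =====

theorem innerLoop_eq (rest : List Int) (count : Int) (k : Nat) :
    innerLoop rest count (count + k + 1) = rest[k]? := by
  induction rest generalizing count k with
  | nil => simp [innerLoop]
  | cons x xs ih =>
    rcases k with _ | k
    · simp [innerLoop]
    · have hne : ¬ (count + 1 = count + (k + 1 : Nat) + 1) := by push_cast; omega
      have harith : count + ((k:Nat)+1:Nat) + 1 = (count + 1) + (k:Nat) + 1 := by push_cast; ring
      simp only [innerLoop, if_neg hne, List.getElem?_cons_succ]
      rw [harith, ih (count + 1) k]

theorem findRemove1_eq (orig rest : List Int) (count : Int) (k : Nat) :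
    findRemove1 orig rest count (count + k + 1) = (rest[k]?).map (pyRemoveI orig) := by
  induction rest generalizing count k with
  | nil => simp [findRemove1]
  | cons x xs ih =>
    rcases k with _ | k
    · simp [findRemove1]
    · have hne : ¬ (count + 1 = count + (k + 1 : Nat) + 1) := by push_cast; omega
      have harith : count + ((k:Nat)+1:Nat) + 1 = (count + 1) + (k:Nat) + 1 := by push_cast; ring
      simp only [findRemove1, if_neg hne, List.getElem?_cons_succ]
      rw [harith, ih (count + 1) k]

theorem findRemove2_eq (orig : List (List Int)) (rest : List (List Int)) (j : Nat)
    (hdrop : orig.drop j = rest) (count : Int) (k : Nat) :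
    findRemove2 orig rest j count (count + k + 1)
      = ((actsB j rest)[k]?).map (applyAction orig) := by
  induction rest generalizing j count k with
  | nil => simp [findRemove2, actsB]
  | cons each rs ih =>
    have hj : orig.getD j [] = each := by
      have h0 : (orig.drop j)[0]? = orig[j + 0]? := List.getElem?_drop
      rw [hdrop] at h0
      simp only [List.getElem?_cons_zero, Nat.add_zero] at h0
      simp [List.getD, ← h0]
    have hdrop' : orig.drop (j + 1) = rs := by
      have hd : List.drop 1 (List.drop j orig) = List.drop (j + 1) orig := List.drop_drop
      rw [← hd, hdrop, List.drop_one]; rfl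
    by_cases h1 : each.length = 1
    · rcases k with _ | k
      · simp [findRemove2, actsB, h1, applyAction, pyRemoveL]
      · have hne : ¬ (count + 1 = count + (k + 1 : Nat) + 1) := by push_cast; omega
        have harith : count + ((k:Nat)+1:Nat) + 1 = (count + 1) + (k:Nat) + 1 := by push_cast; ring
        simp only [findRemove2, actsB, if_pos h1, if_neg hne, List.singleton_append,
          List.getElem?_cons_succ]
        rw [harith, ih (j + 1) hdrop' (count + 1) k]
    · by_cases hk : k < each.length
      · have hin : innerLoop each count (count + k + 1) = some each[k] := by
          rw [innerLoop_eq]; simp [List.getElem?_eq_getElem hk]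
        simp only [findRemove2, actsB, if_neg h1, hin, List.getElem?_append_left
          (by simpa using hk : k < (each.map (PvAction.inner j)).length)]
        simp only [List.getElem?_map, List.getElem?_eq_getElem hk, Option.map_some, applyAction]
        rw [hj]; rfl
      · have hin : innerLoop each count (count + k + 1) = none := by
          have : each[k]? = none := by
            simp only [List.getElem?_eq_none_iff]; omega
          rw [innerLoop_eq, this]
        have hlen : (each.map (PvAction.inner j)).length ≤ k := by simpa using Nat.le_of_not_lt hk
        have harith : count + k + 1
            = (count + each.length) + ((k - each.length : Nat) : Int) + 1 := by
          push_cast [Nat.le_of_not_lt hk]; ring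
        have := ih (j + 1) hdrop' (count + each.length) (k - each.length)
        simp only [findRemove2, actsB, if_neg h1, hin, List.getElem?_append_right hlen]
        rw [harith, this]
        simp

theorem flatMap_range_get (acts : List PvAction) (g : PvAction → List (List Int)) (n : Nat) :
    (List.range n).flatMap (fun k => ((acts[k]?).map g).toList) = (acts.take n).map g := by
  induction n with
  | zero => simp
  | succ n ih =>
    rw [List.range_succ, List.flatMap_append, ih, List.take_add_one]
    rcases h : acts[n]? with _ | a <;> simp [h]

theorem body_eq (candidate : List (List Int)) (i : Int) (hi : 0 ≤ i) :
    (if candidate.length = 1 then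
      match findRemove1 (candidate.headD []) (candidate.headD []) 0 (i + 1) with
      | some newlst => [[newlst]]
      | none => []
    else
      match findRemove2 candidate candidate 0 0 (i + 1) with
      | some c => [c]
      | none => [])
    = (((actionsOf candidate)[i.toNat]?).map (applyAction candidate)).toList := by
  have hi1 : i + 1 = (0 : Int) + i.toNat + 1 := by omega
  by_cases h1 : candidate.length = 1
  · obtain ⟨l, rfl⟩ : ∃ l, candidate = [l] := by
      match candidate, h1 with
      | [l], _ => exact ⟨l, rfl⟩
    rw [hi1]
    simp only [if_pos h1, findRemove1_eq]
    rcases hgl : l[i.toNat]? with _ | v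
    · simp [actionsOf, h1, hgl]
    · simp [actionsOf, h1, hgl, applyAction, pyRemoveI]
  · rw [hi1]
    simp only [if_neg h1, findRemove2_eq candidate candidate 0 rfl]
    rcases hgl : (actsB 0 candidate)[i.toNat]? with _ | a
    · simp [actionsOf, h1, hgl]
    · simp [actionsOf, h1, hgl]

-- ===== VERDICT (by name: the statement is the Claim_ definition above) =====
theorem createSubset_spec : Claim_equal_createSubset := by
  intro candidate length _
  unfold Spec_createSubset createSubset createSubset_alt
  have hrange : PySem.List.pyRange 0 length 1 = (List.range length.toNat).map (fun k : Nat => (k : Int)) := by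
    rw [PySem.List.pyRange_one]
    simp only [Int.sub_zero]
    exact List.map_congr_left fun k _ => by simp
  rw [hrange, List.foldl_map]
  have hbody : ∀ (acc : List (List (List Int))) (k : Nat),
      (fun acc (index : Int) =>
        if candidate.length = 1 then
          match findRemove1 (candidate.headD []) (candidate.headD []) 0 (index + 1) with
          | some newlst => acc ++ [[newlst]]
          | none => acc
        else
          match findRemove2 candidate candidate 0 0 (index + 1) with
          | some c => acc ++ [c]
          | none => acc) acc (k : Int)
      = acc ++ (((actionsOf candidate)[(k : Int).toNat]?).map (applyAction candidate)).toList := by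
    intro acc k
    have := body_eq candidate (k : Int) (by positivity)
    dsimp only at this ⊢
    split_ifs at this ⊢ with h1
    · rcases h : findRemove1 (candidate.headD []) (candidate.headD []) 0 ((k : Int) + 1) with _ | nl <;>
        rw [h] at this <;> dsimp only at this ⊢ <;> rw [← this] <;> simp
    · rcases h : findRemove2 candidate candidate 0 0 ((k : Int) + 1) with _ | c <;>
        rw [h] at this <;> dsimp only at this ⊢ <;> rw [← this] <;> simp
  calc (List.range length.toNat).foldl (fun acc (k : Nat) =>
          (fun acc (index : Int) =>
            if candidate.length = 1 then
              match findRemove1 (candidate.headD []) (candidate.headD []) 0 (index + 1) with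
              | some newlst => acc ++ [[newlst]]
              | none => acc
            else
              match findRemove2 candidate candidate 0 0 (index + 1) with
              | some c => acc ++ [c]
              | none => acc) acc (k : Int)) []
      = (List.range length.toNat).foldl (fun acc (k : Nat) =>
          acc ++ (((actionsOf candidate)[(k : Int).toNat]?).map (applyAction candidate)).toList) [] := by
        apply PySem.List.foldl_congr_mem
        intro acc k _
        exact hbody acc k
    _ = (List.range length.toNat).flatMap
          (fun k => (((actionsOf candidate)[k]?).map (applyAction candidate)).toList) := by
        rw [PySem.List.foldl_append_eq_flatMap]; simp
    _ = ((actionsOf candidate).take length.toNat).map (applyAction candidate) := by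
        rw [flatMap_range_get]
    _ = ((actionsOf candidate).take (max length 0).toNat).map (applyAction candidate) := by
        have hmax : (max length 0).toNat = length.toNat := by omega
        rw [hmax]
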